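-- pv_equiv track=rewrite | github.com/CHIR4G7/MY-CN-CODES | wq.py | minimumTreePath
-- ===== SOURCE A (Python) =====
-- from collections import defaultdict
--
-- def minimumTreePath(n, edges, visitNodes):
--     parent = defaultdict(lambda:-1)
--     G = defaultdict(list)
--     for v,w in edges:
--         G[v].append(w)
--         G[w].append(v)
--     visited = set()
--     def dfs(v, u):
--         if v in visited: return
--         parent[v] = u
--         visited.add(v)
--         for w in G[v]:
--             if w == u: continue
--             dfs(w, v)
--     dfs(1,-1)
--     cores = set()
--     v = n
--     res = -1
--     while v != -1:
--         cores.add(v)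
--         res += 1
--         v = parent[v]
--     for v in visitNodes:
--         tmpres = 0
--         while v not in cores:
--             cores.add(v)
--             tmpres += 2
--             v = parent[v]
--         res += tmpres
--     return res
-- ===== SOURCE B (Python) =====
-- def minimumTreePath(n, edges, visitNodes):
--     G = {}
--     for v, w in edges:
--         G.setdefault(v, []).append(w)
--         G.setdefault(w, []).append(v)
--     parent = {}
--     visited = set()
--     stack = [(1, -1)]
--     while stack:
--         v, u = stack.pop()
--         if v in visited:
--             continue
--         parent[v] = u
--         visited.add(v)
--         for w in reversed(G.get(v, [])):
--             if w != u:
--                 stack.append((w, v))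
--     chain = []
--     v = n
--     while v != -1:
--         chain.append(v)
--         v = parent.get(v, -1)
--     cores = set(chain)
--     res = len(chain) - 1
--     for v in visitNodes:
--         while v not in cores:
--             cores.add(v)
--             res += 2
--             v = parent.get(v, -1)
--     return res
-- ===== Notes on version B (the rewrite author's own statement) =====
-- stated objective: alternative
-- what changed: The recursive dfs is replaced by an explicit-stack traversal (frames (node, parent) pushed in reverse neighbour order, visited check at pop), and the n-to-root walk builds the chain as a list whose length gives the core count instead of mutating a set while counting.
import Mathlib
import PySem

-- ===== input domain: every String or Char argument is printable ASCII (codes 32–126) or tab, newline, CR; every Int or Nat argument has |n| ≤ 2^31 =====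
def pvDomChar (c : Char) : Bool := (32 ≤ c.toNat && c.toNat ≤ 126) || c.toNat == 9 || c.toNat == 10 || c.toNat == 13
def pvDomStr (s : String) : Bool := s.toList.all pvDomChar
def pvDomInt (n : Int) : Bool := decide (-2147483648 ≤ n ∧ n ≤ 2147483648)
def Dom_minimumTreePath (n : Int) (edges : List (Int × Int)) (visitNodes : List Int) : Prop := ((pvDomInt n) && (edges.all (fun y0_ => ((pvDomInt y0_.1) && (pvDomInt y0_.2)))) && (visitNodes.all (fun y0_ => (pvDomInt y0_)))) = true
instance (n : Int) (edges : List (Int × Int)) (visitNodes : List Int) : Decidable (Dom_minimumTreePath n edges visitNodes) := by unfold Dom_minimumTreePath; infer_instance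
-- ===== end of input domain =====

-- B replaces A's recursive dfs by an explicit stack traversal and builds the root chain as a
-- list instead of counting while mutating (objective: alternative decomposition, same cost).

-- ===== PORT A =====
-- defaultdict(list): G[v].append(w) is modify v [] (· ++ [w]); reads of missing keys yield the
-- default value, and the insert-on-read side effect of defaultdict is never observable here.
def pvAdjA (edges : List (Int × Int)) : PySem.Dict Int (List Int) :=
  edges.foldl (fun g e =>
    let g1 := g.modify e.1 [] (fun l => l ++ [e.2])
    g1.modify e.2 [] (fun l => l ++ [e.1])) (PySem.Dict.mk [])

-- the recursive dfs; fuel bounds the recursion DEPTH, which is at most the number of distinct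
-- nodes + 1 ≤ 2*|edges| + 2 (proved sufficient below via pvStab)
def pvDfsA (G : PySem.Dict Int (List Int)) :
    Nat → PySem.Dict Int Int × PySem.Set Int → Int → Int → PySem.Dict Int Int × PySem.Set Int
  | 0, st, _, _ => st
  | f + 1, st, v, u =>
    if st.2.contains v then st
    else
      (G.getD v []).foldl
        (fun s w => if w == u then s else pvDfsA G f s w v)
        (st.1.insert v u, st.2.add v)

-- `while v != -1: cores.add(v); res += 1; v = parent[v]`; fuel bounds the chain length
def pvCoreA (parent : PySem.Dict Int Int) :
    Nat → PySem.Set Int → Int → Int → PySem.Set Int × Int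
  | 0, cores, _, res => (cores, res)
  | f + 1, cores, v, res =>
    if v == -1 then (cores, res)
    else pvCoreA parent f (cores.add v) (parent.getD v (-1)) (res + 1)

-- `while v not in cores: cores.add(v); tmpres += 2; v = parent[v]`
def pvVisitA (parent : PySem.Dict Int Int) :
    Nat → PySem.Set Int → Int → Int → PySem.Set Int × Int
  | 0, cores, _, t => (cores, t)
  | f + 1, cores, v, t =>
    if cores.contains v then (cores, t)
    else pvVisitA parent f (cores.add v) (parent.getD v (-1)) (t + 2)

def minimumTreePath (n : Int) (edges : List (Int × Int)) (visitNodes : List Int) : Int :=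
  let G := pvAdjA edges
  let st := pvDfsA G (2 * edges.length + 2) (PySem.Dict.mk [], PySem.Set.empty) 1 (-1)
  let parent := st.1
  let cr := pvCoreA parent (2 * edges.length + 8) PySem.Set.empty n (-1)
  (visitNodes.foldl
    (fun cr v =>
      let ct := pvVisitA parent (2 * edges.length + 8) cr.1 v 0
      (ct.1, cr.2 + ct.2)) cr).2

-- ===== PORT B =====
-- dict.setdefault(v, []).append(w) is modify v [] (· ++ [w])
def pvAdjB (edges : List (Int × Int)) : PySem.Dict Int (List Int) :=
  edges.foldl (fun g e =>
    let g1 := g.modify e.1 [] (fun l => l ++ [e.2])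
    g1.modify e.2 [] (fun l => l ++ [e.1])) (PySem.Dict.mk [])

-- the explicit stack: list HEAD is the stack top (Python appends/pops at the END); pushing
-- reversed(G[v]) at the end is prepending the filtered neighbour frames in order here.
-- fuel bounds the number of pops, ≤ 1 + total pushes ≤ (2*|edges|+2)^2 (proved via pvSim)
def pvDfsB (G : PySem.Dict Int (List Int)) :
    Nat → PySem.Dict Int Int × PySem.Set Int → List (Int × Int) → PySem.Dict Int Int × PySem.Set Int
  | 0, st, _ => st
  | _ + 1, st, [] => st
  | f + 1, st, (v, u) :: rest =>
    if st.2.contains v then pvDfsB G f st rest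
    else
      pvDfsB G f (st.1.insert v u, st.2.add v)
        ((((G.getD v []).filter (fun w => !(w == u))).map (fun w => (w, v))) ++ rest)

-- `while v != -1: chain.append(v); v = parent.get(v, -1)`
def pvChainB (parent : PySem.Dict Int Int) : Nat → List Int → Int → List Int
  | 0, acc, _ => acc
  | f + 1, acc, v =>
    if v == -1 then acc
    else pvChainB parent f (acc ++ [v]) (parent.getD v (-1))

-- `while v not in cores: cores.add(v); res += 2; v = parent.get(v, -1)`
def pvVisitB (parent : PySem.Dict Int Int) :
    Nat → PySem.Set Int × Int → Int → PySem.Set Int × Int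
  | 0, cr, _ => cr
  | f + 1, (cores, res), v =>
    if cores.contains v then (cores, res)
    else pvVisitB parent f (cores.add v, res + 2) (parent.getD v (-1))

def minimumTreePath_alt (n : Int) (edges : List (Int × Int)) (visitNodes : List Int) : Int :=
  let G := pvAdjB edges
  let st := pvDfsB G ((2 * edges.length + 2) * (2 * edges.length + 2))
      (PySem.Dict.mk [], PySem.Set.empty) [(1, -1)]
  let parent := st.1
  let chain := pvChainB parent (2 * edges.length + 8) [] n
  (visitNodes.foldl (pvVisitB parent (2 * edges.length + 8))
    (PySem.Set.ofList chain, (chain.length : Int) - 1)).2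

-- ===== PRECONDITION & SPEC =====
def Spec_minimumTreePath (n : Int) (edges : List (Int × Int)) (visitNodes : List Int) (out : Int) : Prop := out = minimumTreePath_alt n edges visitNodes
instance (n : Int) (edges : List (Int × Int)) (visitNodes : List Int) (out : Int) : Decidable (Spec_minimumTreePath n edges visitNodes out) := by unfold Spec_minimumTreePath; infer_instance

-- ===== CLAIM (what is proved, stated in full; the proofs are below) =====
def Claim_equal_minimumTreePath : Prop := ∀ (n : Int) (edges : List (Int × Int)) (visitNodes : List Int), Dom_minimumTreePath n edges visitNodes → Spec_minimumTreePath n edges visitNodes (minimumTreePath n edges visitNodes)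

-- ===== LEMMAS AND PROOFS =====

-- the flattened adjacency values and the finite universe of nodes the dfs can ever mark
def pvVals (G : PySem.Dict Int (List Int)) : List Int := G.items.flatMap (fun kv => kv.2)

def pvNodes (G : PySem.Dict Int (List Int)) : Finset Int := insert 1 (pvVals G).toFinset

def pvUnvis (G : PySem.Dict Int (List Int)) (st : PySem.Dict Int Int × PySem.Set Int) : Nat :=
  (pvNodes G \ st.2.toFinset).card

lemma pvMem_getD_vals (G : PySem.Dict Int (List Int)) (v w : Int) (h : w ∈ G.getD v []) :
    w ∈ pvVals G := by
  unfold PySem.Dict.getD PySem.Dict.get? at h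
  cases hf : List.find? (fun p => p.1 == v) G.items with
  | none => simp [hf] at h
  | some p =>
    have hm := List.mem_of_find?_eq_some hf
    simp [hf] at h
    exact List.mem_flatMap.2 ⟨p, hm, h⟩

lemma pvGetD_len_le (G : PySem.Dict Int (List Int)) (v : Int) :
    (G.getD v []).length ≤ (pvVals G).length := by
  unfold PySem.Dict.getD PySem.Dict.get?
  cases hf : List.find? (fun p => p.1 == v) G.items with
  | none => simp
  | some p =>
    have hm := List.mem_of_find?_eq_some hf
    simp only [Option.map_some, Option.getD_some, pvVals, List.length_flatMap]
    exact List.le_sum_of_mem (List.mem_map.2 ⟨p, hm, rfl⟩)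

lemma pvMemAdd (s : PySem.Set Int) (x v : Int) (h : x ∈ s) : x ∈ s.add v := by
  simp [PySem.Set.add]; split <;> simp [h]

lemma pvVisMono (G : PySem.Dict Int (List Int)) (f : Nat)
    (st : PySem.Dict Int Int × PySem.Set Int) (v u x : Int) (h : x ∈ st.2) :
    x ∈ (pvDfsA G f st v u).2 := by
  induction f generalizing st v u with
  | zero => simpa [pvDfsA] using h
  | succ f ih =>
    simp only [pvDfsA]
    split
    · exact h
    · refine List.foldlRecOn (motive := fun (s : PySem.Dict Int Int × PySem.Set Int) => x ∈ s.2) _ _ (pvMemAdd _ _ _ h) ?_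
      intro b hb a _
      by_cases hau : a == u
      · simpa [hau] using hb
      · simpa [hau] using ih _ _ _ hb

lemma pvUnvisLe (G : PySem.Dict Int (List Int)) (f : Nat)
    (st : PySem.Dict Int Int × PySem.Set Int) (v u : Int) :
    pvUnvis G (pvDfsA G f st v u) ≤ pvUnvis G st := by
  apply Finset.card_le_card
  apply Finset.sdiff_subset_sdiff (Finset.Subset.refl _)
  intro x hx
  exact List.mem_toFinset.2 (pvVisMono G f st v u x (List.mem_toFinset.1 hx))

lemma pvUnvisAdd (G : PySem.Dict Int (List Int)) (st : PySem.Dict Int Int × PySem.Set Int)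
    (d : PySem.Dict Int Int) (v : Int) (hv : v ∈ pvNodes G) (hnv : st.2.contains v = false) :
    pvUnvis G (d, st.2.add v) + 1 ≤ pvUnvis G st := by
  have hmem : v ∉ st.2 := by simpa using hnv
  have htf : (st.2.add v).toFinset = insert v st.2.toFinset := by
    simp [PySem.Set.add, PySem.Set.contains, hmem, List.toFinset_append]
  have hvd : v ∈ pvNodes G \ st.2.toFinset :=
    Finset.mem_sdiff.2 ⟨hv, fun hc => hmem (List.mem_toFinset.1 hc)⟩
  unfold pvUnvis
  rw [htf, Finset.sdiff_insert, Finset.card_erase_of_mem hvd]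
  have := Finset.card_pos.2 ⟨v, hvd⟩
  omega

lemma pvStab (G : PySem.Dict Int (List Int)) (k : Nat) :
    ∀ (st : PySem.Dict Int Int × PySem.Set Int) (v u : Int) (f f' : Nat),
      v ∈ pvNodes G → pvUnvis G st ≤ k → k < f → k < f' →
      pvDfsA G f st v u = pvDfsA G f' st v u := by
  induction k using Nat.strong_induction_on with
  | _ k ih =>
    intro st v u f f' hv hu hf hf'
    obtain ⟨fa, rfl⟩ : ∃ fa, f = fa + 1 := ⟨f - 1, by omega⟩
    obtain ⟨fb, rfl⟩ : ∃ fb, f' = fb + 1 := ⟨f' - 1, by omega⟩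
    simp only [pvDfsA]
    split
    · rfl
    · rename_i hc
      have hc' : st.2.contains v = false := by simpa using hc
      have hadd := pvUnvisAdd G st (st.1.insert v u) v hv hc'
      have hk1 : 1 ≤ k := by omega
      have hsub : pvUnvis G (st.1.insert v u, st.2.add v) ≤ k - 1 := by omega
      have hws : ∀ w ∈ G.getD v [], w ∈ pvNodes G := fun w hw =>
        Finset.mem_insert_of_mem (List.mem_toFinset.2 (pvMem_getD_vals G v w hw))
      suffices hfold : ∀ ws, (∀ w ∈ ws, w ∈ pvNodes G) → ∀ s, pvUnvis G s ≤ k - 1 →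
          List.foldl (fun s w => if w == u then s else pvDfsA G fa s w v) s ws
            = List.foldl (fun s w => if w == u then s else pvDfsA G fb s w v) s ws by
        exact hfold _ hws _ hsub
      intro ws
      induction ws with
      | nil => intro _ s _; rfl
      | cons w ws ihw =>
        intro hmem s hs
        simp only [List.foldl_cons]
        by_cases hwu : w == u
        · simp only [if_pos hwu]
          exact ihw (fun x hx => hmem x (List.mem_cons_of_mem _ hx)) s hs
        · simp only [if_neg hwu]
          have hhead : pvDfsA G fa s w v = pvDfsA G fb s w v :=
            ih (k - 1) (by omega) s w v fa fb (hmem w List.mem_cons_self) hs (by omega) (by omega)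
          rw [hhead]
          exact ihw (fun x hx => hmem x (List.mem_cons_of_mem _ hx)) _
            (le_trans (pvUnvisLe G fb s w v) hs)

lemma pvSim (G : PySem.Dict Int (List Int)) (k : Nat) :
    ∀ (frames : List (Int × Int)) (st : PySem.Dict Int Int × PySem.Set Int) (fB fA : Nat),
      (∀ fr ∈ frames, fr.1 ∈ pvNodes G) → pvUnvis G st ≤ k → k < fA →
      frames.length + k * ((pvVals G).length + 1) ≤ fB →
      pvDfsB G fB st frames
        = List.foldl (fun s fr => pvDfsA G fA s fr.1 fr.2) st frames := by
  induction k using Nat.strong_induction_on with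
  | _ k ih =>
    intro frames
    induction frames with
    | nil => intro st fB fA _ _ _ _; cases fB <;> simp [pvDfsB]
    | cons fr rest ihf =>
      intro st fB fA hmem hu hfA hcost
      obtain ⟨v, u⟩ := fr
      simp only [List.length_cons] at hcost
      obtain ⟨fb, rfl⟩ : ∃ fb, fB = fb + 1 := ⟨fB - 1, by omega⟩
      obtain ⟨fa, rfl⟩ : ∃ fa, fA = fa + 1 := ⟨fA - 1, by omega⟩
      simp only [pvDfsB, List.foldl_cons]
      by_cases hc : st.2.contains v = true
      · rw [if_pos hc]
        have hA : pvDfsA G (fa + 1) st v u = st := by simp only [pvDfsA]; rw [if_pos hc]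
        show pvDfsB G fb st rest
            = List.foldl (fun s fr => pvDfsA G (fa + 1) s fr.1 fr.2) (pvDfsA G (fa + 1) st v u) rest
        rw [hA]
        exact ihf st fb (fa + 1) (fun x hx => hmem x (List.mem_cons_of_mem _ hx)) hu hfA (by omega)
      · rw [if_neg hc]
        have hc' : st.2.contains v = false := by simpa using hc
        have hv : v ∈ pvNodes G := hmem (v, u) List.mem_cons_self
        have hadd := pvUnvisAdd G st (st.1.insert v u) v hv hc'
        have hk1 : 1 ≤ k := by omega
        obtain ⟨k', rfl⟩ : ∃ k', k = k' + 1 := ⟨k - 1, by omega⟩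
        have hsub : pvUnvis G (st.1.insert v u, st.2.add v) ≤ k' := by omega
        set L := (pvVals G).length with hL
        set st1 := (st.1.insert v u, st.2.add v) with hst1
        set children := (((G.getD v []).filter (fun w => !(w == u))).map (fun w => (w, v)))
          with hch
        have hchmem : ∀ fr ∈ children, fr.1 ∈ pvNodes G := by
          intro fr hfr
          rw [hch] at hfr
          obtain ⟨w, hw, rfl⟩ := List.mem_map.1 hfr
          exact Finset.mem_insert_of_mem (List.mem_toFinset.2
            (pvMem_getD_vals G v w (List.mem_of_mem_filter hw)))
        have hchlen : children.length ≤ L := by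
          rw [hch, List.length_map]
          exact le_trans (List.length_filter_le _ _) (pvGetD_len_le G v)
        have hmul : (k' + 1) * (L + 1) = k' * (L + 1) + (L + 1) := by ring
        -- the one recursive unfolding of A equals the fold of A over the pushed frames
        have key : pvDfsA G (fa + 1) st v u
            = List.foldl (fun s fr => pvDfsA G (fa + 1) s fr.1 fr.2) st1 children := by
          simp only [pvDfsA, hc', Bool.false_eq_true, if_false, ← hst1]
          rw [hch, List.foldl_map, List.foldl_filter]
          have : ∀ ws, (∀ w ∈ ws, w ∈ pvNodes G) → ∀ s, pvUnvis G s ≤ k' →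
              List.foldl (fun s w => if w == u then s else pvDfsA G fa s w v) s ws
                = List.foldl (fun x y => if (!(y == u)) = true then pvDfsA G (fa + 1) x y v else x)
                    s ws := by
            intro ws
            induction ws with
            | nil => intro _ s _; rfl
            | cons w ws ihw =>
              intro hmem2 s hs
              simp only [List.foldl_cons]
              by_cases hwu : w == u
              · simp only [hwu, Bool.not_true, Bool.false_eq_true, if_false, if_true]
                exact ihw (fun x hx => hmem2 x (List.mem_cons_of_mem _ hx)) s hs
              · have hnw : (!(w == u)) = true := by simp [hwu]
                simp only [if_neg hwu, hnw, if_true]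
                have hhead : pvDfsA G fa s w v = pvDfsA G (fa + 1) s w v :=
                  pvStab G k' s w v fa (fa + 1) (hmem2 w List.mem_cons_self) hs (by omega)
                    (by omega)
                rw [hhead]
                exact ihw (fun x hx => hmem2 x (List.mem_cons_of_mem _ hx)) _
                  (le_trans (pvUnvisLe G (fa + 1) s w v) hs)
          exact this _ (fun w hw => Finset.mem_insert_of_mem (List.mem_toFinset.2
            (pvMem_getD_vals G v w hw))) st1 hsub
        have hrec := ih k' (by omega) (children ++ rest) st1 fb (fa + 1)
          (by intro x hx; rcases List.mem_append.1 hx with h | h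
              · exact hchmem x h
              · exact hmem x (List.mem_cons_of_mem _ h))
          hsub (by omega)
          (by simp only [List.length_append]; omega)
        rw [hrec, List.foldl_append]
        show _ = List.foldl (fun s fr => pvDfsA G (fa + 1) s fr.1 fr.2) (pvDfsA G (fa + 1) st v u) rest
        rw [key]

def pvKN (d : PySem.Dict Int (List Int)) : Prop := (d.items.map Prod.fst).Nodup

lemma pvContains_getD_mem (d : PySem.Dict Int (List Int)) (k : Int)
    (h : d.contains k = true) : (k, d.getD k []) ∈ d.items := by
  have hex : ∃ x ∈ d.items, (x.1 == k) = true := by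
    simpa [PySem.Dict.contains, List.any_eq_true] using h
  have hsome : (List.find? (fun p => p.1 == k) d.items).isSome := by
    rw [List.find?_isSome]; exact hex
  cases hf : List.find? (fun p => p.1 == k) d.items with
  | none => rw [hf] at hsome; simp at hsome
  | some p =>
    have hp := List.find?_some hf
    have hm := List.mem_of_find?_eq_some hf
    have hk : p.1 = k := by simpa using hp
    have : d.getD k [] = p.2 := by
      simp [PySem.Dict.getD, PySem.Dict.get?, hf]
    rw [this, ← hk]
    exact hm

lemma pvNotContains_getD (d : PySem.Dict Int (List Int)) (k : Int)
    (h : d.contains k = false) : d.getD k [] = [] := by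
  have hno : ∀ p ∈ d.items, ¬ (p.1 == k) = true := by
    intro p hp hc
    have : d.contains k = true := by
      simp only [PySem.Dict.contains, List.any_eq_true]
      exact ⟨p, hp, hc⟩
    rw [this] at h; cases h
  have : List.find? (fun p => p.1 == k) d.items = none := by
    rw [List.find?_eq_none]
    intro p hp
    simpa using hno p hp
  simp [PySem.Dict.getD, PySem.Dict.get?, this]

lemma pvFlatRepl (k : Int) (nv : List Int) :
    ∀ (its : List (Int × List Int)), (its.map Prod.fst).Nodup →
    ∀ l : List Int, (k, l) ∈ its → nv.length = l.length + 1 →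
    ((its.map (fun p => if p.1 == k then (k, nv) else p)).flatMap (fun kv => kv.2)).length
      = (its.flatMap (fun kv => kv.2)).length + 1 := by
  intro its
  induction its with
  | nil => intro _ l hl; cases hl
  | cons p rest ih =>
    intro hnd l hmem hlen
    have hnd1 : p.1 ∉ rest.map Prod.fst := (List.nodup_cons.1 (by simpa using hnd)).1
    have hnd2 : (rest.map Prod.fst).Nodup := (List.nodup_cons.1 (by simpa using hnd)).2
    by_cases hpk : (p.1 == k) = true
    · have hk : p.1 = k := by simpa using hpk
      have hpl : p = (k, l) := by
        rcases List.mem_cons.1 hmem with h | h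
        · exact h.symm
        · exact absurd (List.mem_map.2 ⟨(k, l), h, rfl⟩) (by rw [hk] at hnd1; exact hnd1)
      have hrest : rest.map (fun p => if p.1 == k then (k, nv) else p) = rest := by
        conv_rhs => rw [← List.map_id rest]
        apply List.map_congr_left
        intro q hq
        have hqne : ¬ (q.1 == k) = true := by
          intro hqk
          exact hnd1 (List.mem_map.2 ⟨q, hq, by rw [hk]; simpa using hqk⟩)
        simp [hqne]
      simp only [List.map_cons, hpk, if_true, hrest, List.flatMap_cons, List.length_append]
      have : p.2 = l := by rw [hpl]
      rw [this]
      omega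
    · have hmem' : (k, l) ∈ rest := by
        rcases List.mem_cons.1 hmem with h | h
        · exfalso; apply hpk; rw [← h]; simp
        · exact h
      simp only [List.map_cons, hpk, Bool.false_eq_true, if_false, List.flatMap_cons,
        List.length_append]
      rw [ih hnd2 l hmem' hlen]
      omega

lemma pvValsLen_modify (d : PySem.Dict Int (List Int)) (k w : Int) (hnd : pvKN d) :
    (pvVals (d.modify k [] (fun l => l ++ [w]))).length = (pvVals d).length + 1 := by
  unfold PySem.Dict.modify PySem.Dict.insert
  by_cases hc : d.contains k = true
  · rw [if_pos hc]
    exact pvFlatRepl k _ d.items hnd (d.getD k []) (pvContains_getD_mem d k hc) (by simp)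
  · rw [if_neg hc]
    have h0 : d.getD k [] = [] := pvNotContains_getD d k (by simpa using hc)
    simp [pvVals, List.flatMap_append, h0]

lemma pvKN_modify (d : PySem.Dict Int (List Int)) (k w : Int) (hnd : pvKN d) :
    pvKN (d.modify k [] (fun l => l ++ [w])) := by
  unfold pvKN PySem.Dict.modify PySem.Dict.insert
  by_cases hc : d.contains k = true
  · rw [if_pos hc]
    have heq : List.map (Prod.fst ∘ (fun p => if p.1 == k then (k, d.getD k [] ++ [w]) else p))
        d.items = d.items.map Prod.fst := by
      apply List.map_congr_left
      intro q _
      by_cases hq : (q.1 == k) = true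
      · simp only [Function.comp_apply, hq, if_true]
        exact (by simpa using hq : q.1 = k).symm
      · have hq' : ¬ q.1 = k := by simpa using hq
        simp [Function.comp_apply, if_neg hq']
    rw [List.map_map, heq]
    exact hnd
  · rw [if_neg hc]
    have hk : k ∉ d.items.map Prod.fst := by
      intro hm
      apply hc
      obtain ⟨p, hp, hpk⟩ := List.mem_map.1 hm
      simp only [PySem.Dict.contains, List.any_eq_true]
      exact ⟨p, hp, by simp [hpk]⟩
    simp only [List.map_append, List.map_cons, List.map_nil]
    exact List.Nodup.append hnd (List.nodup_singleton k) (by simpa using hk)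

lemma pvAdjInv : ∀ (edges : List (Int × Int)) (g : PySem.Dict Int (List Int)), pvKN g →
    pvKN (edges.foldl (fun g e =>
        let g1 := g.modify e.1 [] (fun l => l ++ [e.2])
        g1.modify e.2 [] (fun l => l ++ [e.1])) g)
    ∧ (pvVals (edges.foldl (fun g e =>
        let g1 := g.modify e.1 [] (fun l => l ++ [e.2])
        g1.modify e.2 [] (fun l => l ++ [e.1])) g)).length
      = (pvVals g).length + 2 * edges.length := by
  intro edges
  induction edges with
  | nil => intro g hg; exact ⟨hg, by simp⟩
  | cons e rest ih =>
    intro g hg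
    simp only [List.foldl_cons, List.length_cons]
    have h1 := pvKN_modify g e.1 e.2 hg
    have h2 := pvKN_modify _ e.2 e.1 h1
    obtain ⟨hk, hlen⟩ := ih _ h2
    refine ⟨hk, ?_⟩
    rw [hlen, pvValsLen_modify _ e.2 e.1 h1, pvValsLen_modify g e.1 e.2 hg]
    ring

lemma pvValsLenAdj (edges : List (Int × Int)) :
    (pvVals (pvAdjA edges)).length = 2 * edges.length := by
  have := (pvAdjInv edges (PySem.Dict.mk []) (by simp [pvKN])).2
  simpa [pvAdjA, pvVals] using this

lemma pvDfsEq (edges : List (Int × Int)) :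
    pvDfsB (pvAdjA edges) ((2 * edges.length + 2) * (2 * edges.length + 2))
        (PySem.Dict.mk [], PySem.Set.empty) [(1, -1)]
      = pvDfsA (pvAdjA edges) (2 * edges.length + 2)
        (PySem.Dict.mk [], PySem.Set.empty) 1 (-1) := by
  set G := pvAdjA edges with hG
  set E := edges.length with hE
  have hL : (pvVals G).length = 2 * E := pvValsLenAdj edges
  have hk : pvUnvis G (PySem.Dict.mk [], PySem.Set.empty) ≤ 2 * E + 1 := by
    unfold pvUnvis
    have h1 : (PySem.Set.empty : PySem.Set Int).toFinset = ∅ := rfl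
    rw [h1, Finset.sdiff_empty]
    calc (pvNodes G).card ≤ (pvVals G).toFinset.card + 1 := by
          unfold pvNodes; exact Finset.card_insert_le _ _
      _ ≤ (pvVals G).length + 1 := by
          have := List.toFinset_card_le (pvVals G); omega
      _ = 2 * E + 1 := by omega
  have hsim := pvSim G (2 * E + 1) [(1, -1)] (PySem.Dict.mk [], PySem.Set.empty)
    ((2 * E + 2) * (2 * E + 2)) (2 * E + 2)
    (by intro fr hfr
        simp only [List.mem_singleton] at hfr
        rw [hfr]
        exact Finset.mem_insert_self 1 _)
    hk (by omega)
    (by simp only [List.length_singleton, hL]; nlinarith)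
  rw [hsim]
  rfl

lemma pvOfListSnoc (acc : List Int) (v : Int) :
    PySem.Set.ofList (acc ++ [v]) = (PySem.Set.ofList acc).add v := by
  simp [PySem.Set.ofList, List.foldl_append]

lemma pvChainEq (p : PySem.Dict Int Int) : ∀ (f : Nat) (acc : List Int) (v : Int),
    pvCoreA p f (PySem.Set.ofList acc) v ((acc.length : Int) - 1)
      = (PySem.Set.ofList (pvChainB p f acc v), ((pvChainB p f acc v).length : Int) - 1) := by
  intro f
  induction f with
  | zero => intro acc v; simp [pvCoreA, pvChainB]
  | succ f ih =>
    intro acc v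
    simp only [pvCoreA, pvChainB]
    by_cases hv : (v == -1) = true
    · simp only [if_pos hv]
    · simp only [if_neg hv]
      have := ih (acc ++ [v]) (p.getD v (-1))
      rw [pvOfListSnoc] at this
      have hlen : ((acc ++ [v]).length : Int) - 1 = (acc.length : Int) - 1 + 1 := by
        simp
      rw [hlen] at this
      exact this

lemma pvVisitShift (p : PySem.Dict Int Int) : ∀ (f : Nat) (c : PySem.Set Int) (v t : Int),
    pvVisitA p f c v t = ((pvVisitA p f c v 0).1, t + (pvVisitA p f c v 0).2) := by
  intro f
  induction f with
  | zero => intro c v t; simp [pvVisitA]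
  | succ f ih =>
    intro c v t
    simp only [pvVisitA]
    by_cases hc : c.contains v = true
    · rw [if_pos hc, if_pos hc]; simp
    · rw [if_neg hc, if_neg hc]
      rw [ih (c.add v) (p.getD v (-1)) (t + 2), ih (c.add v) (p.getD v (-1)) (0 + 2)]
      simp only [Prod.mk.injEq]
      exact ⟨trivial, by omega⟩

lemma pvVisitEq (p : PySem.Dict Int Int) : ∀ (f : Nat) (cr : PySem.Set Int × Int) (v : Int),
    pvVisitB p f cr v = ((pvVisitA p f cr.1 v 0).1, cr.2 + (pvVisitA p f cr.1 v 0).2) := by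
  intro f
  induction f with
  | zero => intro cr v; simp [pvVisitA, pvVisitB]
  | succ f ih =>
    intro cr v
    obtain ⟨c, r⟩ := cr
    simp only [pvVisitA, pvVisitB]
    by_cases hc : c.contains v = true
    · rw [if_pos hc, if_pos hc]; simp
    · rw [if_neg hc, if_neg hc]
      rw [ih (c.add v, r + 2) (p.getD v (-1))]
      rw [pvVisitShift p f (c.add v) (p.getD v (-1)) (0 + 2)]
      simp only [Prod.mk.injEq]
      exact ⟨trivial, by omega⟩

-- ===== VERDICT (by name: the statement is the Claim_ definition above) =====
theorem minimumTreePath_spec : Claim_equal_minimumTreePath := by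
  intro n edges visitNodes _
  have hadj : pvAdjB edges = pvAdjA edges := rfl
  unfold Spec_minimumTreePath
  simp only [minimumTreePath, minimumTreePath_alt, hadj, pvDfsEq edges]
  set parent := (pvDfsA (pvAdjA edges) (2 * edges.length + 2)
    (PySem.Dict.mk [], PySem.Set.empty) 1 (-1)).1
  have hchain := pvChainEq parent (2 * edges.length + 8) [] n
  have h0 : PySem.Set.ofList ([] : List Int) = PySem.Set.empty := rfl
  rw [h0] at hchain
  simp only [List.length_nil, Int.natCast_zero, zero_sub] at hchain
  rw [hchain]
  have hstep : (fun (cr : PySem.Set Int × Int) v =>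
      let ct := pvVisitA parent (2 * edges.length + 8) cr.1 v 0
      (ct.1, cr.2 + ct.2)) = pvVisitB parent (2 * edges.length + 8) := by
    funext cr v
    rw [pvVisitEq]
  rw [hstep]
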